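-- pv_equiv track=rewrite | github.com/evertonsmoraes/TCC_MBA_DataScience_Analytics_USP_Esalq | funcoes_tcc.py | filtrar_e_ordenar_graficos
-- ===== SOURCE A (Python) =====
-- def filtrar_e_ordenar_graficos(graficos_gerados):
--     """
--     Filtra e ordena caminhos de arquivos de gráficos conforme a ordem definida das métricas
--
--     Returns:
--         graficos_gerados (list): Lista com os caminhos completos dos graficos a serem filtrados e ordenados
--     """
--
--
--     # Ordem lógica das métricas
--     ordem_metricas = [
--         #"inercia"
--         "variancia"
--         ,"bic"
--         ,"jaccard"
--         ,"silhoutte"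
--         #,"tamanho_maior_cluster"
--     ]
--
--     # Dicionário métrica -> lista de arquivos encontrados
--     graficos_por_metrica = {metrica: [] for metrica in ordem_metricas}
--
--     for caminho in graficos_gerados:
--         for metrica in ordem_metricas:
--             if metrica in caminho:
--                 graficos_por_metrica[metrica].append(caminho)
--                 break  # evita classificar o mesmo arquivo em duas métricas
--
--     # Consolida na ordem correta
--     graficos_ordenados = []
--     for metrica in ordem_metricas:
--         graficos_ordenados.extend(sorted(graficos_por_metrica[metrica]))
--
--     return graficos_ordenados
-- ===== SOURCE B (Python) =====
-- def filtrar_e_ordenar_graficos(graficos_gerados):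
--     """Sort once globally, then emit paths grouped by the index of the first
--     matching metric -- no dict of buckets and no per-bucket sorts."""
--     ordem_metricas = ["variancia", "bic", "jaccard", "silhoutte"]
--
--     def indice_metrica(caminho):
--         return next((i for i, m in enumerate(ordem_metricas) if m in caminho), None)
--
--     classificados = sorted(c for c in graficos_gerados if indice_metrica(c) is not None)
--     return [c for i in range(len(ordem_metricas)) for c in classificados
--             if indice_metrica(c) == i]
-- ===== Notes on version B (the rewrite author's own statement) =====
-- stated objective: simpler
-- what changed: Replaces the dict of per-metric buckets (filled with an inner break loop) plus four per-bucket sorts and concatenation by one global lexicographic sort of the matching paths followed by a stable selection per metric index from a first-match-index helper.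
import Mathlib
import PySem

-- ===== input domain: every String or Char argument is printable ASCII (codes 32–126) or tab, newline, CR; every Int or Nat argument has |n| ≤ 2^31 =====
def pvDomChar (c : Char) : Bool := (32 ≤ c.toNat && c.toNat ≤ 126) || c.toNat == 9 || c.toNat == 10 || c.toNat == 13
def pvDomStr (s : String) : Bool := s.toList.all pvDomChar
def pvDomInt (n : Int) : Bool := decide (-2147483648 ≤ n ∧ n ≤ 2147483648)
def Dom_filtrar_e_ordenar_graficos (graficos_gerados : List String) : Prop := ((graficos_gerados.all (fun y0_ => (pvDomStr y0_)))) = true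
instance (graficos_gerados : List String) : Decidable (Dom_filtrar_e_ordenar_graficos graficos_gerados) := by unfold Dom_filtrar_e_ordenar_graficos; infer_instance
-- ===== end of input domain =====

-- B replaces A's dict of buckets + per-bucket sorts by one global sort and a
-- per-metric-index stable selection (objective: simpler); return values proved equal.

-- ===== PORT A =====
def pvOrdemMetricas : List String := ["variancia", "bic", "jaccard", "silhoutte"]

-- inner loop 'for metrica in ordem_metricas: if metrica in caminho: append; break'
def pvClassifica (d : PySem.Dict String (List String)) (caminho : String) :
    List String → PySem.Dict String (List String)
  | [] => d
  | m :: rest =>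
      if PySem.Str.isIn m caminho then d.modify m [] (· ++ [caminho])
      else pvClassifica d caminho rest

def filtrar_e_ordenar_graficos (graficos_gerados : List String) : List String :=
  let ordem_metricas := pvOrdemMetricas
  let graficos_por_metrica :=
    ordem_metricas.foldl (fun d m => d.insert m ([] : List String)) PySem.Dict.empty
  let graficos_por_metrica :=
    graficos_gerados.foldl (fun d caminho => pvClassifica d caminho ordem_metricas)
      graficos_por_metrica
  ordem_metricas.foldl
    (fun acc m => acc ++ PySem.List.sorted (graficos_por_metrica.getD m []) (fun x => x) false) []

-- ===== PORT B =====
-- next((i for i, m in enumerate(ordem_metricas) if m in caminho), None)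
def pvIndiceMetrica (caminho : String) : Option Nat :=
  pvOrdemMetricas.findIdx? (fun m => PySem.Str.isIn m caminho)

def filtrar_e_ordenar_graficos_alt (graficos_gerados : List String) : List String :=
  let classificados :=
    PySem.List.sorted (graficos_gerados.filter (fun c => (pvIndiceMetrica c).isSome))
      (fun x => x) false
  (List.range pvOrdemMetricas.length).flatMap
    (fun i => classificados.filter (fun c => pvIndiceMetrica c == some i))

-- ===== PRECONDITION & SPEC =====
def Spec_filtrar_e_ordenar_graficos (graficos_gerados : List String) (out : List String) : Prop := out = filtrar_e_ordenar_graficos_alt graficos_gerados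
instance (graficos_gerados : List String) (out : List String) : Decidable (Spec_filtrar_e_ordenar_graficos graficos_gerados out) := by unfold Spec_filtrar_e_ordenar_graficos; infer_instance

-- ===== CLAIM (what is proved, stated in full; the proofs are below) =====
def Claim_equal_filtrar_e_ordenar_graficos : Prop := ∀ (graficos_gerados : List String), Dom_filtrar_e_ordenar_graficos graficos_gerados → Spec_filtrar_e_ordenar_graficos graficos_gerados (filtrar_e_ordenar_graficos graficos_gerados)

-- ===== LEMMAS AND PROOFS =====

-- one step of the loop body, seen at the j-th bucket
lemma pv_step (d : PySem.Dict String (List String)) (c : String) (j : Nat)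
    (hj : j < pvOrdemMetricas.length) :
    (pvClassifica d c pvOrdemMetricas).getD (pvOrdemMetricas[j]!) [] =
      d.getD (pvOrdemMetricas[j]!) [] ++
        (if pvIndiceMetrica c == some j then [c] else []) := by
  simp only [pvOrdemMetricas, List.length_cons, List.length_nil] at hj
  interval_cases j <;>
    simp only [pvOrdemMetricas, pvClassifica, pvIndiceMetrica, List.findIdx?_cons, List.findIdx?_nil,
      List.getElem!_cons_zero, List.getElem!_cons_succ] <;>
    split_ifs <;>
    simp_all [PySem.Dict.getD_modify]

-- bucket for the j-th metric after the whole loop: the paths whose first match is index j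
lemma pv_bucket (g : List String) (d : PySem.Dict String (List String)) (j : Nat)
    (hj : j < pvOrdemMetricas.length) :
    (g.foldl (fun d caminho => pvClassifica d caminho pvOrdemMetricas) d).getD
        (pvOrdemMetricas[j]!) [] =
      d.getD (pvOrdemMetricas[j]!) [] ++ g.filter (fun c => pvIndiceMetrica c == some j) := by
  induction g generalizing d with
  | nil => simp
  | cons c g ih =>
      simp only [List.foldl_cons]
      rw [ih, pv_step d c j hj, List.filter_cons]
      by_cases h : pvIndiceMetrica c == some j <;> simp [h]

-- a filter of a stably id-sorted list is the id-sort of the filter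
lemma pv_filter_sorted (l : List String) (p : String → Bool) :
    (PySem.List.sorted l (fun x => x) false).filter p =
      PySem.List.sorted (l.filter p) (fun x => x) false := by
  refine (PySem.List.sorted_id_eq_of_perm_of_pairwise (l.filter p)
      ((PySem.List.sorted l (fun x => x) false).filter p) ?_ ?_).symm
  · exact ((PySem.List.sorted_perm l (fun x => x) false).filter p)
  · exact (PySem.List.sorted_pairwise l (fun x => x)).sublist List.filter_sublist

-- dropping the is-some prefilter under a first-match-index filter
lemma pv_filter_some (g : List String) (i : Nat) :
    (g.filter (fun c => (pvIndiceMetrica c).isSome)).filter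
        (fun c => pvIndiceMetrica c == some i) =
      g.filter (fun c => pvIndiceMetrica c == some i) := by
  rw [List.filter_filter]
  refine List.filter_congr ?_
  intro c _
  cases hc : pvIndiceMetrica c <;> simp_all

-- the four buckets, starting from the all-empty initial dict
lemma pv_bucket0 (g : List String) (j : Nat) (hj : j < pvOrdemMetricas.length) :
    ((g.foldl (fun d caminho => pvClassifica d caminho pvOrdemMetricas)
        (pvOrdemMetricas.foldl (fun d m => d.insert m ([] : List String))
          PySem.Dict.empty)).getD (pvOrdemMetricas[j]!) []) =
      g.filter (fun c => pvIndiceMetrica c == some j) := by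
  rw [pv_bucket g _ j hj]
  have h0 : (pvOrdemMetricas.foldl (fun d m => d.insert m ([] : List String))
      PySem.Dict.empty).getD (pvOrdemMetricas[j]!) [] = [] := by
    simp only [pvOrdemMetricas, List.length_cons, List.length_nil] at hj
    interval_cases j <;> decide
  rw [h0, List.nil_append]

-- ===== VERDICT (by name: the statement is the Claim_ definition above) =====
theorem filtrar_e_ordenar_graficos_spec : Claim_equal_filtrar_e_ordenar_graficos := by
  intro g _
  show filtrar_e_ordenar_graficos g = filtrar_e_ordenar_graficos_alt g
  have h0 := pv_bucket0 g 0 (by decide)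
  have h1 := pv_bucket0 g 1 (by decide)
  have h2 := pv_bucket0 g 2 (by decide)
  have h3 := pv_bucket0 g 3 (by decide)
  simp only [pvOrdemMetricas, List.getElem!_cons_zero, List.getElem!_cons_succ, List.foldl_cons, List.foldl_nil] at h0 h1 h2 h3
  unfold filtrar_e_ordenar_graficos filtrar_e_ordenar_graficos_alt
  simp only [pvOrdemMetricas, List.foldl_cons, List.foldl_nil, List.nil_append,
    List.length_cons, List.length_nil, List.range_succ, List.range_zero]
  rw [h0, h1, h2, h3]
  simp only [List.flatMap_append, List.flatMap_cons, List.flatMap_nil, List.append_nil]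
  rw [pv_filter_sorted, pv_filter_sorted, pv_filter_sorted, pv_filter_sorted,
    pv_filter_some, pv_filter_some, pv_filter_some, pv_filter_some]
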